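-- pv_equiv track=rewrite | github.com/CdkeyTJ/NLP_Partition_work | build_model.py | encode_data_old
-- ===== SOURCE A (Python) =====
-- def sliding_window(sentence, labels, window_size, stride):
--     """
--     使用滑动窗口分割句子和标签序列，保留前后文信息。
--     """
--     sub_sentences, sub_labels = [], []
--
--     # 遍历句子，按滑动窗口分割
--     for i in range(0, len(sentence), stride):
--         # 获取当前窗口的子句
--         sub_sentence = sentence[max(0, i):min(len(sentence), i + window_size)]
--         sub_label = labels[max(0, i):min(len(labels), i + window_size)]
--
--         # 填充至窗口大小
--         sub_sentence = ['<PAD>'] * max(0, window_size - len(sub_sentence)) + sub_sentence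
--         sub_label = [-1] * max(0, window_size - len(sub_label)) + sub_label
--
--         sub_sentences.append(sub_sentence)
--         sub_labels.append(sub_label)
--
--     return sub_sentences, sub_labels
--
-- def encode_data_old(sentences, labels, vocab, label_map, window_size=100, stride=50):
--     '''
--     使用滑动窗口将句子和标签编码为数字，并保留上下文信息。
--     将句子和标签编码为数字
--     Return: padded_sentences, padded_labels
--     '''
--     encoded_sentences, encoded_labels = [], []
--
--     # 遍历每个句子和对应的标签序列
--     for sentence, label_seq in zip(sentences, labels):
--         # 使用滑动窗口分割句子和标签
--         sub_sentences, sub_labels = sliding_window(sentence, label_seq, window_size, stride)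
--
--         # 通过词汇表将句子中的字符转为整数，即句子转为整数列表
--         for sub_sentence, sub_label in zip(sub_sentences, sub_labels):
--             encoded_sentences.append([vocab.get(char, 0) for char in sub_sentence]) #词频编码
--             # encoded_sentences.append([0 if char == "<PAD>" else ord(char) for char in sub_sentence]) # ACSII编码
--             encoded_labels.append([label_map.get(label, -1) for label in sub_label])
--
--     return encoded_sentences, encoded_labels
-- ===== SOURCE B (Python) =====
-- def encode_data_old(sentences, labels, vocab, label_map, window_size=100, stride=50):
--     """Encode once per sentence, then window the encoded arrays (no string windows)."""
--     pad = vocab.get('<PAD>', 0)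
--     lpad = label_map.get(-1, -1)
--     enc_s, enc_l = [], []
--     for sentence, label_seq in zip(sentences, labels):
--         enc = [vocab.get(c, 0) for c in sentence]
--         encl = [label_map.get(l, -1) for l in label_seq]
--         for i in range(0, len(sentence), stride):
--             w = enc[i:i + window_size]
--             wl = encl[i:i + window_size]
--             enc_s.append([pad] * (window_size - len(w)) + w)
--             enc_l.append([lpad] * (window_size - len(wl)) + wl)
--     return enc_s, enc_l
-- ===== Notes on version B (the rewrite author's own statement) =====
-- stated objective: alternative
-- what changed: B drops the sliding_window helper: it integer-encodes each sentence/label sequence once, then slices the encoded arrays per window and left-pads with precomputed vocab.get('<PAD>',0) / label_map.get(-1,-1), instead of building padded string windows and re-encoding every overlapping window.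
import Mathlib
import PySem

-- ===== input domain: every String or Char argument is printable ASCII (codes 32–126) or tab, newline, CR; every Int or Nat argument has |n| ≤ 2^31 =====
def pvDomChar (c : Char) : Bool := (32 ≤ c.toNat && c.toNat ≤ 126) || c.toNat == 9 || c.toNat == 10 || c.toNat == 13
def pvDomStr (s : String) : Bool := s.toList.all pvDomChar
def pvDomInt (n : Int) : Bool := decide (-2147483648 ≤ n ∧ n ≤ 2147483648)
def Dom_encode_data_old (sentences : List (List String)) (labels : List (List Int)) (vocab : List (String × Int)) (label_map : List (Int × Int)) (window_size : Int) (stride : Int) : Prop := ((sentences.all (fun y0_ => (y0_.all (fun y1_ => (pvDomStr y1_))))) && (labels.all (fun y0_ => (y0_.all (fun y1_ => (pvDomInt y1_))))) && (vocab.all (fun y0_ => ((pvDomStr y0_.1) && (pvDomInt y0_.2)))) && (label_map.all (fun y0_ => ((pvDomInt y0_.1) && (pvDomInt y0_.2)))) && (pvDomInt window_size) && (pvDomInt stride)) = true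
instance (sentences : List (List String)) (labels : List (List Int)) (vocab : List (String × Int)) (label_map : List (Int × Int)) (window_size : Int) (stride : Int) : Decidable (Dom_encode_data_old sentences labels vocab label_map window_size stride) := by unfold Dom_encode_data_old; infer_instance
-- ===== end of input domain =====

-- B encodes each sentence/label sequence ONCE and windows the encoded arrays, instead of
-- A's string-level sliding_window helper followed by re-encoding every (overlapping) window.
-- Return-value equivalence only (neither version mutates its arguments).

-- ===== PORT A =====
def pvSlidingWindow (sentence : List String) (labels : List Int) (window_size stride : Int) :
    List (List String) × List (List Int) :=
  (PySem.List.pyRange 0 (sentence.length : Int) stride).foldl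
    (fun acc i =>
      let sub_sentence := PySem.List.slice sentence (some (max 0 i)) (some (min (sentence.length : Int) (i + window_size)))
      let sub_label := PySem.List.slice labels (some (max 0 i)) (some (min (labels.length : Int) (i + window_size)))
      let sub_sentence2 := List.replicate (max 0 (window_size - (sub_sentence.length : Int))).toNat "<PAD>" ++ sub_sentence
      let sub_label2 := List.replicate (max 0 (window_size - (sub_label.length : Int))).toNat (-1 : Int) ++ sub_label
      (acc.1 ++ [sub_sentence2], acc.2 ++ [sub_label2]))
    ([], [])

def encode_data_old (sentences : List (List String)) (labels : List (List Int)) (vocab : List (String × Int)) (label_map : List (Int × Int)) (window_size : Int) (stride : Int) : List (List Int) × List (List Int) :=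
  (sentences.zip labels).foldl
    (fun acc p =>
      let sw := pvSlidingWindow p.1 p.2 window_size stride
      (sw.1.zip sw.2).foldl
        (fun acc2 q =>
          (acc2.1 ++ [q.1.map (fun ch => (PySem.Dict.ofList vocab).getD ch 0)],
           acc2.2 ++ [q.2.map (fun lab => (PySem.Dict.ofList label_map).getD lab (-1))]))
        acc)
    ([], [])

-- ===== PORT B =====
def encode_data_old_alt (sentences : List (List String)) (labels : List (List Int)) (vocab : List (String × Int)) (label_map : List (Int × Int)) (window_size : Int) (stride : Int) : List (List Int) × List (List Int) :=
  let vd := PySem.Dict.ofList vocab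
  let ld := PySem.Dict.ofList label_map
  let pad := vd.getD "<PAD>" 0
  let lpad := ld.getD (-1) (-1)
  (sentences.zip labels).foldl
    (fun acc p =>
      let enc := p.1.map (fun c => vd.getD c 0)
      let encl := p.2.map (fun l => ld.getD l (-1))
      (PySem.List.pyRange 0 (p.1.length : Int) stride).foldl
        (fun acc2 i =>
          let w := PySem.List.slice enc (some i) (some (i + window_size))
          let wl := PySem.List.slice encl (some i) (some (i + window_size))
          (acc2.1 ++ [List.replicate (window_size - (w.length : Int)).toNat pad ++ w],
           acc2.2 ++ [List.replicate (window_size - (wl.length : Int)).toNat lpad ++ wl]))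
        acc)
    ([], [])

-- ===== PRECONDITION & SPEC =====
-- Pre_ excludes only stride = 0 with a nonempty sentence/label zip: there Python's
-- range(0, len, 0) raises ValueError (in A and in B alike).
def Pre_encode_data_old (sentences : List (List String)) (labels : List (List Int)) (vocab : List (String × Int)) (label_map : List (Int × Int)) (window_size : Int) (stride : Int) : Prop :=
  stride ≠ 0 ∨ sentences = [] ∨ labels = []
instance (sentences : List (List String)) (labels : List (List Int)) (vocab : List (String × Int)) (label_map : List (Int × Int)) (window_size : Int) (stride : Int) : Decidable (Pre_encode_data_old sentences labels vocab label_map window_size stride) := by unfold Pre_encode_data_old; infer_instance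

def pvWitness_encode_data_old : List (List String) × List (List Int) × (List (String × Int)) × (List (Int × Int)) × Int × Int :=
  ([["a", "b", "c"], ["d"]], [[1, 2, 3], [0]], [("a", 5), ("b", 7)], [(1, 10), (2, 20)], 2, 1)

def Spec_encode_data_old (sentences : List (List String)) (labels : List (List Int)) (vocab : List (String × Int)) (label_map : List (Int × Int)) (window_size : Int) (stride : Int) (out : List (List Int) × List (List Int)) : Prop := out = encode_data_old_alt sentences labels vocab label_map window_size stride
instance (sentences : List (List String)) (labels : List (List Int)) (vocab : List (String × Int)) (label_map : List (Int × Int)) (window_size : Int) (stride : Int) (out : List (List Int) × List (List Int)) : Decidable (Spec_encode_data_old sentences labels vocab label_map window_size stride out) := by unfold Spec_encode_data_old; infer_instance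

-- ===== CLAIM (what is proved, stated in full; the proofs are below) =====
def Claim_equal_encode_data_old : Prop := ∀ (sentences : List (List String)) (labels : List (List Int)) (vocab : List (String × Int)) (label_map : List (Int × Int)) (window_size : Int) (stride : Int), Dom_encode_data_old sentences labels vocab label_map window_size stride → Pre_encode_data_old sentences labels vocab label_map window_size stride → Spec_encode_data_old sentences labels vocab label_map window_size stride (encode_data_old sentences labels vocab label_map window_size stride)

-- ===== LEMMAS AND PROOFS =====

-- a fold that appends one element to each component of a pair accumulator is a pair of maps
theorem pv_foldl_append_pair {α β γ : Type} (f : α → β) (g : α → γ) (xs : List α)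
    (a : List β) (b : List γ) :
    xs.foldl (fun acc i => (acc.1 ++ [f i], acc.2 ++ [g i])) (a, b) = (a ++ xs.map f, b ++ xs.map g) := by
  induction xs generalizing a b with
  | nil => simp
  | cons x xs ih => simp [ih]

theorem pv_clampIdx_max (n : Nat) (i : Int) (h : 0 ≤ i) :
    PySem.List.clampIdx n (max 0 i) = PySem.List.clampIdx n i := by
  simp only [PySem.List.clampIdx]; split_ifs <;> omega

theorem pv_clampIdx_min (n : Nat) (b : Int) :
    PySem.List.clampIdx n (min (n : Int) b) = PySem.List.clampIdx n b := by
  simp only [PySem.List.clampIdx]; split_ifs <;> omega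

-- A's clamped slice bounds equal B's raw bounds once 0 ≤ i
theorem pv_slice_shift {α : Type} (xs : List α) (i b : Int) (h : 0 ≤ i) :
    PySem.List.slice xs (some (max 0 i)) (some (min (xs.length : Int) b)) =
      PySem.List.slice xs (some i) (some b) := by
  simp only [PySem.List.slice, pv_clampIdx_max _ _ h, pv_clampIdx_min]

theorem pv_map_slice {α β : Type} (f : α → β) (xs : List α) (a b : Int) :
    (PySem.List.slice xs (some a) (some b)).map f = PySem.List.slice (xs.map f) (some a) (some b) := by
  simp [PySem.List.slice, PySem.List.clampIdx]

theorem pv_pyRange_nonneg (n : Nat) (s i : Int) (h : i ∈ PySem.List.pyRange 0 (n : Int) s) : 0 ≤ i := by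
  rcases lt_trichotomy s 0 with hs | hs | hs
  · have : PySem.List.pyRange 0 (n : Int) s = [] := by
      simp [PySem.List.pyRange]
      intro _
      split_ifs <;> omega
    simp [this] at h
  · subst hs; simp [PySem.List.pyRange] at h
  · exact ((PySem.List.mem_pyRange_iff_of_pos hs i).mp h).1

theorem encode_data_old_spec : Claim_equal_encode_data_old := by
  intro sentences labels vocab label_map window_size stride _hdom hpre
  unfold Spec_encode_data_old encode_data_old encode_data_old_alt
  rcases hpre with hs | hs | hs
  · -- stride ≠ 0 : show the two outer folding functions agree on every pair and accumulator
    apply List.foldl_ext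
    intro acc p _hp
    -- characterize A's sliding window as two maps over the range
    have hsw : pvSlidingWindow p.1 p.2 window_size stride =
        ((PySem.List.pyRange 0 (p.1.length : Int) stride).map (fun i =>
            List.replicate (max 0 (window_size - ((PySem.List.slice p.1 (some (max 0 i)) (some (min (p.1.length : Int) (i + window_size)))).length : Int))).toNat "<PAD>" ++
              PySem.List.slice p.1 (some (max 0 i)) (some (min (p.1.length : Int) (i + window_size)))),
         (PySem.List.pyRange 0 (p.1.length : Int) stride).map (fun i =>
            List.replicate (max 0 (window_size - ((PySem.List.slice p.2 (some (max 0 i)) (some (min (p.2.length : Int) (i + window_size)))).length : Int))).toNat (-1 : Int) ++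
              PySem.List.slice p.2 (some (max 0 i)) (some (min (p.2.length : Int) (i + window_size))))) := by
      unfold pvSlidingWindow
      exact pv_foldl_append_pair _ _ _ [] []
    dsimp only
    rw [hsw]
    rw [List.zip_map']
    rw [List.foldl_map]
    obtain ⟨a, b⟩ := acc
    rw [pv_foldl_append_pair, pv_foldl_append_pair]
    rw [Prod.mk.injEq]
    constructor <;>
    · apply congrArg
      apply List.map_congr_left
      intro i hi
      have h0 : (0 : Int) ≤ i := pv_pyRange_nonneg _ _ _ hi
      rw [← pv_slice_shift _ i (i + window_size) h0]
      simp only [List.map_append, List.map_replicate, pv_map_slice, List.length_map,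
        PySem.List.length_slice]
      congr 1
      congr 1
      omega
  · subst hs; rfl
  · subst hs; simp
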